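-- pv_equiv track=rewrite | github.com/nickzuber/chs | chs/ui/board.py | _score_pieces
-- ===== SOURCE A (Python) =====
-- def _score_pieces(pieces):
--   score = 0
--   scores = {
--     'r': 5,
--     'n': 3,
--     'b': 3,
--     'q': 9,
--     'k': 0,
--     'p': 1
--   }
--   for piece in pieces:
--     score += scores.get(piece)
--   return score
-- ===== SOURCE B (Python) =====
-- def _score_pieces(pieces):
--   counts = {}
--   for piece in pieces:
--     counts[piece] = counts.get(piece, 0) + 1
--   scores = {
--     'r': 5,
--     'n': 3,
--     'b': 3,
--     'q': 9,
--     'k': 0,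
--     'p': 1
--   }
--   total = 0
--   for piece, n in counts.items():
--     total += n * scores.get(piece)
--   return total
-- ===== Notes on version B (the rewrite author's own statement) =====
-- stated objective: alternative
-- what changed: B first builds a frequency table of the pieces, then accumulates count * score over the distinct pieces only, instead of one dict lookup per element.
import Mathlib
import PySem

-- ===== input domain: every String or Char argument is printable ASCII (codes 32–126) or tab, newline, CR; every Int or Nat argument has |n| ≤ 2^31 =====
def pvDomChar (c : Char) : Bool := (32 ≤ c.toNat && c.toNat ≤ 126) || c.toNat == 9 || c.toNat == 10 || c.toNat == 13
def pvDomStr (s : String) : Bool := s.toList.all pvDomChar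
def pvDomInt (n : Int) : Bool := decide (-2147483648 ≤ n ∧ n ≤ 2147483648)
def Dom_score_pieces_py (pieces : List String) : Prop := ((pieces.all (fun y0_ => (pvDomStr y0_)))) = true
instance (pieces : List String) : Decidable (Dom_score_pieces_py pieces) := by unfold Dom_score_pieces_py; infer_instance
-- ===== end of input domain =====

-- B replaces A's per-element lookup-and-add with a frequency table followed by a
-- weighted sum over the distinct pieces (alternative decomposition, same cost).

-- the scores dict, shared by both sources
def pvScoresDict : PySem.Dict String Int :=
  PySem.Dict.ofList [("r", 5), ("n", 3), ("b", 3), ("q", 9), ("k", 0), ("p", 1)]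

-- ===== PORT A =====
-- `score += scores.get(piece)`: under Pre_ every piece is a key, so get returns a
-- value; the `.getD 0` only totalizes the port (Python raises TypeError otherwise).
def score_pieces_py (pieces : List String) : Int :=
  pieces.foldl (fun score piece => score + (pvScoresDict.get? piece).getD 0) 0

-- ===== PORT B =====
-- counts[piece] = counts.get(piece, 0) + 1, then total += n * scores.get(piece)
def score_pieces_py_alt (pieces : List String) : Int :=
  let counts : PySem.Dict String Int :=
    pieces.foldl (fun d piece => d.insert piece (d.getD piece 0 + 1)) PySem.Dict.empty
  counts.items.foldl (fun total pn => total + pn.2 * (pvScoresDict.get? pn.1).getD 0) 0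

-- ===== PRECONDITION & SPEC =====
-- Pre_ excludes pieces outside the score table: there A's `score += scores.get(piece)`
-- raises TypeError (int + None); B raises TypeError there too.
def Pre_score_pieces_py (pieces : List String) : Prop :=
  ∀ p ∈ pieces, p ∈ ["r", "n", "b", "q", "k", "p"]
instance (pieces : List String) : Decidable (Pre_score_pieces_py pieces) := by
  unfold Pre_score_pieces_py; infer_instance
def pvWitness_score_pieces_py : List String := ["p", "q", "r", "p"]

def Spec_score_pieces_py (pieces : List String) (out : Int) : Prop := out = score_pieces_py_alt pieces
instance (pieces : List String) (out : Int) : Decidable (Spec_score_pieces_py pieces out) := by unfold Spec_score_pieces_py; infer_instance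

-- ===== CLAIM (what is proved, stated in full; the proofs are below) =====
def Claim_equal_score_pieces_py : Prop := ∀ (pieces : List String), Dom_score_pieces_py pieces → Pre_score_pieces_py pieces → Spec_score_pieces_py pieces (score_pieces_py pieces)

-- ===== LEMMAS AND PROOFS =====

-- a plain fold of (+ f x) is the sum of the mapped list
theorem foldl_add_eq_sum_map {α : Type} (f : α → Int) (l : List α) (a : Int) :
    l.foldl (fun s x => s + f x) a = a + (l.map f).sum := by
  induction l generalizing a with
  | nil => simp
  | cons x t ih => simp [List.foldl, ih, add_assoc]

-- summing f over l equals summing (count x) * f x over the distinct elements of l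
theorem sum_map_eq_sum_dedup (f : String → Int) (l : List String) :
    (l.map f).sum = ((PySem.Set.ofList l).map (fun k => ((l.count k : Int)) * f k)).sum := by
  have hfin : (PySem.Set.ofList l).toFinset = l.toFinset := by
    ext x; simp [← PySem.List.dedup_eq_ofList, PySem.List.mem_dedup]
  calc (l.map f).sum
      = ∑ m ∈ l.toFinset, l.count m • f m := Finset.sum_list_map_count l f
    _ = ∑ m ∈ (PySem.Set.ofList l).toFinset, ((l.count m : Int)) * f m := by
        rw [hfin]; exact Finset.sum_congr rfl (fun m _ => by simp)
    _ = ((PySem.Set.ofList l).map (fun k => ((l.count k : Int)) * f k)).sum := by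
        rw [List.sum_toFinset _ (by simpa [← PySem.List.dedup_eq_ofList] using PySem.List.nodup_dedup l)]

-- ===== VERDICT (by name: the statement is the Claim_ definition above) =====
theorem score_pieces_py_spec : Claim_equal_score_pieces_py := by
  intro pieces _ _
  unfold Spec_score_pieces_py score_pieces_py score_pieces_py_alt
  rw [PySem.Dict.foldl_insert_getD_add_one_eq_counter]
  show List.foldl (fun score piece => score + (pvScoresDict.get? piece).getD 0) 0 pieces =
       List.foldl (fun total pn => total + pn.2 * (pvScoresDict.get? pn.1).getD 0) 0 (PySem.Dict.counter pieces).items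
  rw [PySem.Dict.items_counter,
    foldl_add_eq_sum_map, foldl_add_eq_sum_map (f := fun pn : String × Int => pn.2 * (pvScoresDict.get? pn.1).getD 0),
    List.map_map, sum_map_eq_sum_dedup]
  rfl
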